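-- pv_equiv track=rewrite | github.com/FlashingFuture/TIL | algorithm/PS/swea_algorithm/0215/1860/best_fishbread.py | selling_bread
-- ===== SOURCE A (Python) =====
-- def selling_bread(m, k, arr):
--     arr.sort()
--     bread_left = 0  # 남은 빵의 수
--     temp = 0
--     leftover_time = 0       # 완성을 못했지만 굽던 시간
--     for item in arr:
--         temp = item - temp      # 이전 방문 시간과 현 방문 시간의 차이
--         bread_left += (temp // m) * k   # 그 시간동안 구운 붕어빵 추가
--         leftover_time += temp % m
--         if leftover_time >= m:          # 이전 횟수로부터 물려받은 시간을 더해 한 번 더 구웠을 시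
--             leftover_time -= m
--             bread_left += k
--
--         bread_left -= 1         # 붕어빵 판매
--         if bread_left < 0:      # 붕어빵이 없다면
--             return 'Impossible'
--
--         temp = item             # temp에 이전 방문시간 넣음
--
--     return 'Possible'
-- ===== SOURCE B (Python) =====
-- def selling_bread(m, k, arr):
--     arr.sort()
--     for i, t in enumerate(arr):
--         if (t // m) * k < i + 1:
--             return 'Impossible'
--     return 'Possible'
-- ===== Notes on version B (the rewrite author's own statement) =====
-- stated objective: simpler
-- what changed: Replaces A's stateful leftover-time carry machine (bread_left/temp/leftover_time with an extra-batch branch) by the closed-form cumulative production (t // m) * k compared against i + 1 at each sorted visit.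
-- outside the precondition, e.g. on selling_bread(-5, 6, [-6, 1, 0]): A returns 'Possible', B returns 'Impossible'
import Mathlib
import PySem

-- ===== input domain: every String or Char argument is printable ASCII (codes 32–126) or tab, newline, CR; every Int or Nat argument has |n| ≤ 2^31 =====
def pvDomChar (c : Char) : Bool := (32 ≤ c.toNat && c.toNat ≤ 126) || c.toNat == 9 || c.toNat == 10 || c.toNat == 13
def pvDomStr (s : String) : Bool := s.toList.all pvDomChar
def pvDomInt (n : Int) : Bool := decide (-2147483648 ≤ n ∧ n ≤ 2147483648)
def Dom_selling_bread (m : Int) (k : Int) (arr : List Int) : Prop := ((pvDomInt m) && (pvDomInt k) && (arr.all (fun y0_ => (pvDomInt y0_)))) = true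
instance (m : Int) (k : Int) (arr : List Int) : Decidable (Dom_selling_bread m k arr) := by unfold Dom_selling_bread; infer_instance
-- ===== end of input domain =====

-- B replaces A's leftover-time carry state machine by the closed form (t // m) * k ≥ i + 1
-- over the sorted visits (simpler, same asymptotic cost). Both Pythons sort arr in place;
-- the equivalence proved here is about the return value.

-- ===== PORT A =====
def sellingBreadLoopA (m k : Int) : List Int → Int → Int → Int → String
  | [], _bread, _temp, _lo => "Possible"
  | item :: rest, bread, temp, lo =>
    let diff := item - temp
    let bread1 := bread + (PySem.Int.floordiv diff m) * k
    let lo1 := lo + PySem.Int.mod diff m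
    let lo2 := if lo1 ≥ m then lo1 - m else lo1
    let bread2 := if lo1 ≥ m then bread1 + k else bread1
    let bread3 := bread2 - 1
    if bread3 < 0 then "Impossible"
    else sellingBreadLoopA m k rest bread3 item lo2

def selling_bread (m : Int) (k : Int) (arr : List Int) : String :=
  sellingBreadLoopA m k (PySem.List.sorted arr (fun x => x) false) 0 0 0

-- ===== PORT B =====
def sellingBreadLoopB (m k : Int) : List (Int × Int) → String
  | [] => "Possible"
  | (i, t) :: rest =>
    if (PySem.Int.floordiv t m) * k < i + 1 then "Impossible"
    else sellingBreadLoopB m k rest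

def selling_bread_alt (m : Int) (k : Int) (arr : List Int) : String :=
  sellingBreadLoopB m k (PySem.List.enumerate (PySem.List.sorted arr (fun x => x) false))

-- ===== PRECONDITION & SPEC =====
-- Pre_ restricts to the problem's natural domain of a positive baking period m (or no
-- customers): m = 0 raises ZeroDivisionError in both Pythons, and for m ≤ -1 with customers
-- A's leftover-time carry interacts with Python's negative-divisor floor division in an
-- accidental way no caller would specify, so B does not match it there.
def Pre_selling_bread (m : Int) (k : Int) (arr : List Int) : Prop := 1 ≤ m ∨ arr = []
instance (m : Int) (k : Int) (arr : List Int) : Decidable (Pre_selling_bread m k arr) := by unfold Pre_selling_bread; infer_instance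

def pvWitness_selling_bread : Int × Int × List Int := (2, 3, [1, 4, 4])

def Spec_selling_bread (m : Int) (k : Int) (arr : List Int) (out : String) : Prop := out = selling_bread_alt m k arr
instance (m : Int) (k : Int) (arr : List Int) (out : String) : Decidable (Spec_selling_bread m k arr out) := by unfold Spec_selling_bread; infer_instance

-- ===== CLAIM (what is proved, stated in full; the proofs are below) =====
def Claim_equal_selling_bread : Prop := ∀ (m : Int) (k : Int) (arr : List Int), Dom_selling_bread m k arr → Pre_selling_bread m k arr → Spec_selling_bread m k arr (selling_bread m k arr)

-- ===== LEMMAS AND PROOFS =====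

lemma mod_bounds (a m : Int) (hm : 0 < m) :
    0 ≤ PySem.Int.mod a m ∧ PySem.Int.mod a m < m := by
  rw [PySem.Int.mod_eq_emod_of_pos hm]
  exact ⟨Int.emod_nonneg a (by omega), Int.emod_lt_of_pos a hm⟩

-- cumulative production carry: floor-sum identity behind A's extra-batch branch
lemma carry_floordiv (m p t : Int) (hm : 0 < m) :
    PySem.Int.floordiv t m =
      PySem.Int.floordiv p m + PySem.Int.floordiv (t - p) m +
        (if m ≤ PySem.Int.mod p m + PySem.Int.mod (t - p) m then 1 else 0) := by
  have hp := PySem.Int.floordiv_mul_add_mod p m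
  have hd := PySem.Int.floordiv_mul_add_mod (t - p) m
  have h1 := mod_bounds p m hm
  have h2 := mod_bounds (t - p) m hm
  split_ifs with h
  · rw [PySem.Int.floordiv_eq_iff_of_pos hm]
    constructor <;> nlinarith
  · rw [PySem.Int.floordiv_eq_iff_of_pos hm]
    constructor <;> nlinarith

lemma carry_mod (m p t : Int) (hm : 0 < m) :
    PySem.Int.mod t m =
      PySem.Int.mod p m + PySem.Int.mod (t - p) m -
        (if m ≤ PySem.Int.mod p m + PySem.Int.mod (t - p) m then m else 0) := by
  have hp := PySem.Int.floordiv_mul_add_mod p m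
  have hd := PySem.Int.floordiv_mul_add_mod (t - p) m
  have ht := PySem.Int.floordiv_mul_add_mod t m
  have hf := carry_floordiv m p t hm
  split_ifs at hf ⊢ with h
  · linear_combination ht - hp - hd - m * hf
  · linear_combination ht - hp - hd - m * hf

lemma loop_eq (m k : Int) (hm : 0 < m) :
    ∀ (l : List Int) (i p : Int),
      sellingBreadLoopA m k l (PySem.Int.floordiv p m * k - i) p (PySem.Int.mod p m)
        = sellingBreadLoopB m k (PySem.List.enumerate l i) := by
  intro l
  induction l with
  | nil => intro i p; simp [sellingBreadLoopA, sellingBreadLoopB, PySem.List.enumerate_nil]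
  | cons t rest ih =>
    intro i p
    rw [PySem.List.enumerate_cons]
    simp only [sellingBreadLoopA, sellingBreadLoopB]
    have hf := carry_floordiv m p t hm
    have hmo := carry_mod m p t hm
    by_cases hc : PySem.Int.mod p m + PySem.Int.mod (t - p) m ≥ m
    · rw [if_pos hc, if_pos hc]
      rw [if_pos (ge_iff_le.mp hc)] at hf hmo
      have hb : PySem.Int.floordiv p m * k - i + PySem.Int.floordiv (t - p) m * k + k - 1
          = PySem.Int.floordiv t m * k - (i + 1) := by rw [hf]; ring
      have hl : PySem.Int.mod p m + PySem.Int.mod (t - p) m - m = PySem.Int.mod t m := by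
        omega
      rw [hb, hl]
      by_cases h : PySem.Int.floordiv t m * k < i + 1
      · rw [if_pos (by omega : PySem.Int.floordiv t m * k - (i + 1) < 0), if_pos h]
      · rw [if_neg (by omega : ¬ PySem.Int.floordiv t m * k - (i + 1) < 0), if_neg h]
        exact ih (i + 1) t
    · rw [if_neg hc, if_neg hc]
      rw [if_neg (fun hx => hc (ge_iff_le.mpr hx))] at hf hmo
      have hb : PySem.Int.floordiv p m * k - i + PySem.Int.floordiv (t - p) m * k - 1
          = PySem.Int.floordiv t m * k - (i + 1) := by rw [hf]; ring
      have hl : PySem.Int.mod p m + PySem.Int.mod (t - p) m = PySem.Int.mod t m := by omega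
      rw [hb, hl]
      by_cases h : PySem.Int.floordiv t m * k < i + 1
      · rw [if_pos (by omega : PySem.Int.floordiv t m * k - (i + 1) < 0), if_pos h]
      · rw [if_neg (by omega : ¬ PySem.Int.floordiv t m * k - (i + 1) < 0), if_neg h]
        exact ih (i + 1) t

-- ===== VERDICT (by name: the statement is the Claim_ definition above) =====
theorem selling_bread_spec : Claim_equal_selling_bread := by
  intro m k arr _ hpre
  unfold Spec_selling_bread selling_bread selling_bread_alt
  rcases hpre with hm | hnil
  · have h0 : PySem.Int.floordiv 0 m = 0 := by
      rw [PySem.Int.floordiv_eq_ediv_of_pos (by omega)]; simp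
    have h0' : PySem.Int.mod 0 m = 0 := by
      rw [PySem.Int.mod_eq_emod_of_pos (by omega)]; simp
    have := loop_eq m k (by omega) (PySem.List.sorted arr (fun x => x) false) 0 0
    rw [h0, h0'] at this
    simpa using this
  · subst hnil
    simp [PySem.List.sorted, sellingBreadLoopA, sellingBreadLoopB]
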